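-- pv_equiv track=rewrite | github.com/itsarvindhere/binary-search | 019. Compare Strings by Frequency of the Smallest Character/WithoutBinarySearch.py | f
-- ===== SOURCE A (Python) =====
-- def f(s):
--     freq = 0
--     smallest = s[0]
--
--     # In same loop, not just update the count but also keep track of smallest character
--     for c in s:
--         # If we get a smaller character, update smallest and reset freq to 1
--         if ord(c) < ord(smallest):
--             smallest = c
--             freq = 1
--
--         # If we get the same character as smallest, increment frequency
--         elif ord(c) == ord(smallest): freq += 1
--
--
--
--     # Return the frequency of smallest character
--     return freq
-- ===== SOURCE B (Python) =====
-- def f(s):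
--     # Two separate passes: find the smallest character, then count it.
--     return s.count(min(s))
-- ===== Notes on version B (the rewrite author's own statement) =====
-- stated objective: simpler
-- what changed: Replaces the single combined loop that tracks the running minimum and resets a counter with two independent standard-library passes, min(s) then s.count(min(s)).
import Mathlib
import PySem

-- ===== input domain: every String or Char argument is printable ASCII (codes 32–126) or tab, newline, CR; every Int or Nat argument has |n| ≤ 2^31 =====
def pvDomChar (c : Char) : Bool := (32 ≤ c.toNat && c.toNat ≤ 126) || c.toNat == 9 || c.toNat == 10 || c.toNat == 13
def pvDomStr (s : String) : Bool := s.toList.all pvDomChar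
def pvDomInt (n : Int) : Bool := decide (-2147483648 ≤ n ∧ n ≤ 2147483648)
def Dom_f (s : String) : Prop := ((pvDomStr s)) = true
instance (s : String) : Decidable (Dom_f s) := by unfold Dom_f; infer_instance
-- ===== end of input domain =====

-- B replaces A's single combined min-tracking/counter-resetting loop by two independent
-- passes (find the minimum character, then count it): simpler, same O(n) cost.

-- ===== PORT A =====
-- one step of A's loop: state = (freq, smallest); ord(c) comparisons are Char.toNat
def fStep (st : Int × Char) (c : Char) : Int × Char :=
  if c.toNat < st.2.toNat then (1, c)
  else if c.toNat == st.2.toNat then (st.1 + 1, st.2)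
  else st

def f (s : String) : Int :=
  match s.toList with
  | [] => 0            -- unreachable under Pre_f: Python A raises IndexError on s[0]
  | c0 :: _ => (s.toList.foldl fStep (0, c0)).1

-- ===== PORT B =====
def f_alt (s : String) : Int :=
  match PySem.List.min? s.toList (fun c => c) with  -- min(s); none = ValueError, outside Pre_f
  | none => 0
  | some m => (s.toList.count m : Int)   -- s.count(m): exact, m is a single character

-- ===== PRECONDITION & SPEC =====
-- Pre_f excludes only the empty string, on which A raises IndexError (s[0]).
def Pre_f (s : String) : Prop := s.toList ≠ []
instance (s : String) : Decidable (Pre_f s) := by unfold Pre_f; infer_instance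
def pvWitness_f : String := "aba"
def Spec_f (s : String) (out : Int) : Prop := out = f_alt s
instance (s : String) (out : Int) : Decidable (Spec_f s out) := by unfold Spec_f; infer_instance

-- ===== CLAIM (what is proved, stated in full; the proofs are below) =====
def Claim_equal_f : Prop := ∀ (s : String), Dom_f s → Pre_f s → Spec_f s (f s)

-- ===== LEMMAS AND PROOFS =====

theorem char_lt_iff (c m : Char) : c < m ↔ c.toNat < m.toNat := by
  rw [Char.lt_def, UInt32.lt_iff_toNat_lt]; rfl

theorem char_eq_iff (c m : Char) : c = m ↔ c.toNat = m.toNat := by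
  constructor
  · rintro rfl; rfl
  · intro h; exact Char.ext (UInt32.toNat_inj.mp h)

-- Loop invariant of A's fold: the running state (a, m) ends as
-- (count of the overall min, with a kept only if m is still the min; overall min).
theorem fStep_invariant (l : List Char) (a : Int) (m : Char) :
    l.foldl fStep (a, m) =
      ((if l.foldl min m = m then a else 0) + l.count (l.foldl min m), l.foldl min m) := by
  induction l generalizing a m with
  | nil => simp
  | cons c t ih =>
    have hmin_le : ∀ (x : Char) (u : List Char), u.foldl min x ≤ x :=
      fun x u => (PySem.List.foldl_min_le u x).1
    simp only [List.foldl_cons, List.count_cons]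
    by_cases h1 : c.toNat < m.toNat
    · have hcm : c < m := (char_lt_iff c m).mpr h1
      have hs : fStep (a, m) c = (1, c) := by simp [fStep, h1]
      rw [hs, ih]
      have hmc : min m c = c := min_eq_right hcm.le
      simp only [hmc]
      have hne : t.foldl min c ≠ m := fun he =>
        absurd (he ▸ hmin_le c t) (not_le.mpr hcm)
      by_cases h2 : t.foldl min c = c
      · simp [h2, hcm.ne]
        omega
      · simp [h2, hne]
        exact fun he => h2 (Eq.symm he)
    · by_cases h2 : c.toNat = m.toNat
      · have hcm : c = m := (char_eq_iff c m).mpr h2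
        subst hcm
        have hs : fStep (a, c) c = (a + 1, c) := by simp [fStep]
        rw [hs, ih]
        simp only [min_self]
        by_cases h3 : t.foldl min c = c
        · simp [h3]
          omega
        · simp [h3]
          exact fun he => h3 (Eq.symm he)
      · have hmc' : m < c := (char_lt_iff m c).mpr (by omega)
        have hs : fStep (a, m) c = (a, m) := by simp [fStep, h1, h2]
        rw [hs, ih]
        have hmm : min m c = m := min_eq_left hmc'.le
        simp only [hmm]
        have hne : t.foldl min m ≠ c := fun he =>
          absurd (he ▸ hmin_le m t) (not_le.mpr hmc')
        simp
        exact fun he => hne (Eq.symm he)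

-- ===== VERDICT (by name: the statement is the Claim_ definition above) =====
theorem f_spec : Claim_equal_f := by
  unfold Claim_equal_f
  intro s _ hpre
  unfold Spec_f f f_alt Pre_f at *
  cases hl : s.toList with
  | nil => exact absurd hl hpre
  | cons c0 t =>
    rw [PySem.List.min?_id_cons]
    simp only [List.foldl_cons]
    have h0 : fStep (0, c0) c0 = (1, c0) := by simp [fStep]
    rw [h0, fStep_invariant]
    simp only [List.count_cons]
    by_cases h : t.foldl min c0 = c0
    · simp [h]
      omega
    · simp [h]
      exact fun he => h (Eq.symm he)
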